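-- pv_equiv track=rewrite | github.com/Gocho1234/BuggyDataBaseFP | Projeto1.py | obter_pin
-- ===== SOURCE A (Python) =====
-- def obter_posicao(movimento, posicao):
--     # obter_posicao: cad. carateres x inteiro → inteiro
--     """Realiza um único movimento do teclado e retorna o dígito da posição final.
--
--     Recebe um movimento a realizar (Cima, Baixo, Direita ou Esquerda) e um dígito
--     de onde ele inicia esse movimento. O teclado é representado através da constante
--     "TECLADO", que é um tuplo em que cada uma das 3 entradas tem um tuplo com 3
--     entradas, que representam linhas do teclado.
--     Devolve o dígito do teclado após o movimento.
--     Nunca gera erros.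
--     """
--     TECLADO = ((1, 2, 3),
--                (4, 5, 6),
--                (7, 8, 9))
--
--     if 1 <= posicao <= 3:
--         linha = 0
--         posicao -= 1
--     elif 4 <= posicao <= 6:
--         linha = 1
--         posicao -= 4
--     elif 7 <= posicao <= 9:
--         linha = 2
--         posicao -= 7
--
--     LIMITES_DO_TECLADO = {'C': linha == 0,
--                           'B': linha == 2,
--                           'D': posicao == 2,
--                           'E': posicao == 0}
--
--     if LIMITES_DO_TECLADO[movimento]:
--         pass
--     elif movimento == 'C':
--         linha -= 1
--     elif movimento == 'B':
--         linha += 1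
--     elif movimento == 'D':
--         posicao += 1
--     elif movimento == 'E':
--         posicao -= 1
--
--     return TECLADO[linha] [posicao]
--
-- def obter_digito(movimentos, posicao):
--     # obter_digito: cad. carateres x inteiro → inteiro
--     """Obtém um dígito após a realização de uma cadeia de movimentos no teclado.
--
--     Recebe uma cadeia de movimentos a realizar no teclado.
--     Devolve o dígito após esses movimentos terem sido efetuados, partindo do
--     dígito representado pelo seu segundo argumento.
--     Nunca gera erros.
--     """
--     movimentos = list(movimentos)
--
--     for movimento in movimentos:
--         movimento = obter_posicao(movimento, posicao)
--         posicao = movimento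
--
--     return posicao
--
-- def obter_pin(pin):
--     # obter_pin: tuplo → tuplo
--     """Obtém o pin associado ao seu primeiro argumento.
--
--     Recebe um pin com vários movimentos para cada dígito do pin.
--     Devolve o pin associado a esses movimentos, começando sempre pelo dígito
--     5 no teclado para o primeiro algarismo do pin. Cada algarismo seguinte inicia
--     no teclado o movimento, partindo do algarismo anterior no pin.
--     Cria um ValueError se o seu argumento for inválido. Para argumentos válidos, são
--     considerados tuplos com 4 a 10 entradas, em que cada entrada contém movimentos
--     válidos para obter um algarismo para o pin.
--     """
--     if not (isinstance(pin, tuple) and 4 <= len(pin) <= 10):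
--         raise ValueError('obter_pin: argumento invalido')
--
--     COMP_PIN = len(pin)
--     digito_antigo = 5
--     for movimentos in range(COMP_PIN):
--         if pin[movimentos] == '': raise ValueError('obter_pin: argumento invalido')
--
--         for movimento in pin[movimentos]:
--             if not 66 <= ord(movimento) <= 69:
--                 raise ValueError('obter_pin: argumento invalido')
--
--         digito = obter_digito(pin[movimentos], digito_antigo)
--         pin = pin[:movimentos] + (digito,) + pin[movimentos + 1:]
--         digito_antigo = digito
--
--     return pin
-- ===== SOURCE B (Python) =====
-- def obter_pin(pin):
--     """Same validation as A; tracks keypad (row, col) coordinates through one pass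
--     instead of re-deriving row/col from the digit and rebuilding the tuple by slicing."""
--     if not (isinstance(pin, tuple) and 4 <= len(pin) <= 10):
--         raise ValueError('obter_pin: argumento invalido')
--
--     out = []
--     r, c = 1, 1  # digit 5
--     for movs in pin:
--         if movs == '':
--             raise ValueError('obter_pin: argumento invalido')
--         for m in movs:
--             if not 66 <= ord(m) <= 69:
--                 raise ValueError('obter_pin: argumento invalido')
--             if m == 'C':
--                 r = max(r - 1, 0)
--             elif m == 'B':
--                 r = min(r + 1, 2)
--             elif m == 'D':
--                 c = min(c + 1, 2)
--             else:  # 'E'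
--                 c = max(c - 1, 0)
--         out.append(r * 3 + c + 1)
--     return tuple(out)
-- ===== Notes on version B (the rewrite author's own statement) =====
-- stated objective: simpler
-- what changed: B keeps the keypad position as (row, col) coordinates clamped arithmetically in a single pass and appends each digit to an output list, instead of A's per-move digit->row/offset re-derivation via range tests, a limits dict, a 3x3 table lookup, and rebuilding the tuple by slicing on every step.
import Mathlib
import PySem

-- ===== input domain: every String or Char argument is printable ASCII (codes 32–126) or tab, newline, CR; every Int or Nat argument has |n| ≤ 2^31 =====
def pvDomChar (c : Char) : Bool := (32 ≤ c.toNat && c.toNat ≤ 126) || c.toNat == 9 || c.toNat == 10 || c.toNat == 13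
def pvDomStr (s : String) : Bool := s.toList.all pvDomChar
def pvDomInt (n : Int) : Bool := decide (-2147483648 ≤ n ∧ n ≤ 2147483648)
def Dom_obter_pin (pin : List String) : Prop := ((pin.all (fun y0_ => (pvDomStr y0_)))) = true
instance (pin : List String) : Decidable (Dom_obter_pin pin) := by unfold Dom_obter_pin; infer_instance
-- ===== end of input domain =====

-- B replaces A's digit→row/offset range tests, limits dict and 3x3 table lookup by clamped
-- (row, col) coordinate arithmetic threaded through one pass; equal return values on Pre_.
-- (A's and B's ValueError inputs coincide and are excluded by Pre_.)

-- ===== PORT A =====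
-- obter_posicao: the if/elif chain, the limits dict, the movement update, and the table lookup.
-- Python raises NameError for posicao outside 1..9 (no branch taken); the final else branch
-- stands in for that unreachable case (under Pre_ the position is always a keypad digit 1..9).
def obter_posicao (movimento : Char) (posicao : Int) : Int :=
  let lp : Int × Int :=
    if 1 ≤ posicao ∧ posicao ≤ 3 then (0, posicao - 1)
    else if 4 ≤ posicao ∧ posicao ≤ 6 then (1, posicao - 4)
    else (2, posicao - 7)
  let linha := lp.1
  let pos := lp.2
  -- LIMITES_DO_TECLADO[movimento]; keys 'C','B','D','E' (movimento validated to be one of these)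
  let limite : Bool :=
    if movimento = 'C' then linha == 0
    else if movimento = 'B' then linha == 2
    else if movimento = 'D' then pos == 2
    else pos == 0
  let lp2 : Int × Int :=
    if limite then (linha, pos)
    else if movimento = 'C' then (linha - 1, pos)
    else if movimento = 'B' then (linha + 1, pos)
    else if movimento = 'D' then (linha, pos + 1)
    else (linha, pos - 1)
  -- TECLADO[linha][posicao]; indices are always in range here (getD 0 marks the unreachable none)
  (PySem.List.pyGet? ((PySem.List.pyGet? ([[1,2,3],[4,5,6],[7,8,9]] : List (List Int)) lp2.1).getD []) lp2.2).getD 0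

def obter_digito (movimentos : String) (posicao : Int) : Int :=
  movimentos.toList.foldl (fun p m => obter_posicao m p) posicao

-- the outer loop: each entry is replaced by its digit, threading digito_antigo forward
def obter_pin (pin : List String) : List Int :=
  (pin.foldl (fun (st : List Int × Int) movimentos =>
      let digito := obter_digito movimentos st.2
      (st.1 ++ [digito], digito)) ([], 5)).1

-- ===== PORT B =====
def bStep (rc : Int × Int) (m : Char) : Int × Int :=
  if m = 'C' then (max (rc.1 - 1) 0, rc.2)
  else if m = 'B' then (min (rc.1 + 1) 2, rc.2)
  else if m = 'D' then (rc.1, min (rc.2 + 1) 2)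
  else (rc.1, max (rc.2 - 1) 0)

def obter_pin_alt (pin : List String) : List Int :=
  (pin.foldl (fun (st : List Int × Int × Int) movs =>
      let rc := movs.toList.foldl bStep st.2
      (st.1 ++ [rc.1 * 3 + rc.2 + 1], rc)) ([], 1, 1)).1

-- ===== PRECONDITION & SPEC =====
-- Exactly the inputs on which Python's obter_pin returns (B raises the same ValueError on the rest):
-- 4..10 entries, no empty entry, every character one of 'B','C','D','E' (codes 66..69).
def Pre_obter_pin (pin : List String) : Prop :=
  4 ≤ pin.length ∧ pin.length ≤ 10 ∧
  (pin.all (fun s => !(s == "") && s.toList.all (fun c => c == 'B' || c == 'C' || c == 'D' || c == 'E'))) = true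
instance (pin : List String) : Decidable (Pre_obter_pin pin) := by unfold Pre_obter_pin; infer_instance
def pvWitness_obter_pin : List String := ["B", "CC", "DD", "EE"]

def Spec_obter_pin (pin : List String) (out : List Int) : Prop := out = obter_pin_alt pin
instance (pin : List String) (out : List Int) : Decidable (Spec_obter_pin pin out) := by unfold Spec_obter_pin; infer_instance

-- ===== CLAIM (what is proved, stated in full; the proofs are below) =====
def Claim_equal_obter_pin : Prop := ∀ (pin : List String), Dom_obter_pin pin → Pre_obter_pin pin → Spec_obter_pin pin (obter_pin pin)

-- ===== LEMMAS AND PROOFS =====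

def validChar (c : Char) : Prop := c = 'B' ∨ c = 'C' ∨ c = 'D' ∨ c = 'E'

lemma bStep_bounds (rc : Int × Int) (m : Char)
    (hr : 0 ≤ rc.1 ∧ rc.1 ≤ 2) (hc : 0 ≤ rc.2 ∧ rc.2 ≤ 2) :
    (0 ≤ (bStep rc m).1 ∧ (bStep rc m).1 ≤ 2) ∧ (0 ≤ (bStep rc m).2 ∧ (bStep rc m).2 ≤ 2) := by
  unfold bStep; split_ifs <;> simp <;> omega

lemma pos_step (m : Char) (hm : validChar m) (r c : Int)
    (hr : 0 ≤ r ∧ r ≤ 2) (hc : 0 ≤ c ∧ c ≤ 2) :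
    obter_posicao m (r * 3 + c + 1) = (bStep (r, c) m).1 * 3 + (bStep (r, c) m).2 + 1 := by
  obtain ⟨hr0, hr2⟩ := hr
  obtain ⟨hc0, hc2⟩ := hc
  interval_cases r <;> interval_cases c <;>
    rcases hm with h | h | h | h <;> subst h <;> decide

lemma digito_step (l : List Char) (hm : ∀ ch ∈ l, validChar ch) (r c : Int)
    (hr : 0 ≤ r ∧ r ≤ 2) (hc : 0 ≤ c ∧ c ≤ 2) :
    l.foldl (fun p m => obter_posicao m p) (r * 3 + c + 1)
      = (l.foldl bStep (r, c)).1 * 3 + (l.foldl bStep (r, c)).2 + 1 ∧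
    (0 ≤ (l.foldl bStep (r, c)).1 ∧ (l.foldl bStep (r, c)).1 ≤ 2) ∧
    (0 ≤ (l.foldl bStep (r, c)).2 ∧ (l.foldl bStep (r, c)).2 ≤ 2) := by
  induction l generalizing r c with
  | nil => exact ⟨rfl, hr, hc⟩
  | cons m l ih =>
    have hv := hm m (List.mem_cons_self ..)
    have hb := bStep_bounds (r, c) m hr hc
    have := ih (fun ch h => hm ch (List.mem_cons_of_mem _ h))
      (bStep (r, c) m).1 (bStep (r, c) m).2 hb.1 hb.2
    simpa [List.foldl_cons, pos_step m hv r c hr hc] using this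

lemma main_loop (pin : List String)
    (hp : ∀ s ∈ pin, ∀ ch ∈ s.toList, validChar ch)
    (acc : List Int) (r c : Int) (hr : 0 ≤ r ∧ r ≤ 2) (hc : 0 ≤ c ∧ c ≤ 2) :
    (pin.foldl (fun (st : List Int × Int) movimentos =>
        let digito := obter_digito movimentos st.2
        (st.1 ++ [digito], digito)) (acc, r * 3 + c + 1)).1
      = (pin.foldl (fun (st : List Int × Int × Int) movs =>
          let rc := movs.toList.foldl bStep st.2
          (st.1 ++ [rc.1 * 3 + rc.2 + 1], rc)) (acc, r, c)).1 := by
  induction pin generalizing acc r c with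
  | nil => rfl
  | cons s pin ih =>
    have hs := hp s (List.mem_cons_self ..)
    obtain ⟨heq, hr', hc'⟩ := digito_step s.toList hs r c hr hc
    simp only [List.foldl_cons, obter_digito, heq]
    exact ih (fun t ht ch h => hp t (List.mem_cons_of_mem _ ht) ch h)
      (acc ++ [(s.toList.foldl bStep (r, c)).1 * 3 + (s.toList.foldl bStep (r, c)).2 + 1])
      (s.toList.foldl bStep (r, c)).1 (s.toList.foldl bStep (r, c)).2 hr' hc'

-- ===== VERDICT (by name: the statement is the Claim_ definition above) =====
theorem obter_pin_spec : Claim_equal_obter_pin := by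
  intro pin _ hpre
  unfold Spec_obter_pin obter_pin obter_pin_alt
  have hv : ∀ s ∈ pin, ∀ ch ∈ s.toList, validChar ch := by
    intro s hs ch hch
    have := hpre.2.2
    rw [List.all_eq_true] at this
    have hs' := this s hs
    simp only [Bool.and_eq_true, List.all_eq_true] at hs'
    have := hs'.2 ch hch
    simp only [Bool.or_eq_true, beq_iff_eq] at this
    unfold validChar
    tauto
  have := main_loop pin hv [] 1 1 (by norm_num) (by norm_num)
  simpa using this
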